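-- pv_equiv track=rewrite | github.com/renwei-release/dave | Project/Python/project/public/tools/t_dict.py | t_dict_surround
-- ===== SOURCE A (Python) =====
-- def t_dict_surround(dict_data):
--     dict_key_ls = list(dict_data.keys())
--     dict_value_ls = list(dict_data.values())
--
--     head_data = {}
--
--     new_dict = {}
--     for i in range(len(dict_key_ls)):
--         if i == 0:
--             head_data = {dict_key_ls[0]: dict_value_ls[0]}
--         elif i == len(dict_key_ls) - 1:
--             new_dict.update(head_data)
--         else:
--             new_dict[dict_key_ls[i]] = dict_value_ls[i]
--
--     return new_dict
-- ===== SOURCE B (Python) =====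
-- def t_dict_surround(dict_data):
--     items = list(dict_data.items())
--     if len(items) < 2:
--         return {}
--     first_key, first_value = items[0]
--     new_dict = dict(items[1:-1])
--     new_dict[first_key] = first_value
--     return new_dict
-- ===== Notes on version B (the rewrite author's own statement) =====
-- stated objective: simpler
-- what changed: Replaces A's index loop over range(len) with its three-way branch and mutable head_data state by a direct construction: dict(items[1:-1]) for the middle entries, then append the first entry; a len<2 guard covers the empty results for 0- and 1-entry dicts.
import Mathlib
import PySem

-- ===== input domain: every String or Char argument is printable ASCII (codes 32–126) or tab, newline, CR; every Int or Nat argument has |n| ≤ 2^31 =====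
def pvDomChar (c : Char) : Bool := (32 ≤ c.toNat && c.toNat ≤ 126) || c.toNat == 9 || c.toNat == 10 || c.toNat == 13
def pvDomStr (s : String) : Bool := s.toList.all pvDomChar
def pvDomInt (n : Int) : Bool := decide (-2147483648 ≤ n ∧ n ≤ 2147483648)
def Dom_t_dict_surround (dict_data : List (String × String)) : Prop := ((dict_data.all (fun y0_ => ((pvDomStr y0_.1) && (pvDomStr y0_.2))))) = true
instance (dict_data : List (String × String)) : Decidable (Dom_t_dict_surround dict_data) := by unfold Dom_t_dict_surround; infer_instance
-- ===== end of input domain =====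

-- B replaces A's index loop with its head/elif/else branching and mutable head_data state
-- by a direct slice build: dict(items[1:-1]) then append the first entry (objective: simpler).

-- ===== PORT A =====
-- literal transliteration of A: keys/values lists, an index loop over range(n) whose state is
-- the pair (head_data, new_dict); branches in the same order as the Python.
def t_dict_surround (dict_data : List (String × String)) : List (String × String) :=
  let d : PySem.Dict String String := PySem.Dict.mk dict_data
  let dict_key_ls := d.keys
  let dict_value_ls := d.values
  let n : Int := (dict_key_ls.length : Int)
  let st := (PySem.List.pyRange 0 n 1).foldl
    (fun (st : PySem.Dict String String × PySem.Dict String String) i =>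
      if i = 0 then
        (PySem.Dict.mk [(PySem.List.pyGetD dict_key_ls 0 "",
                         PySem.List.pyGetD dict_value_ls 0 "")], st.2)
      else if i = n - 1 then
        (st.1, st.2.update st.1.items)
      else
        (st.1, st.2.insert (PySem.List.pyGetD dict_key_ls i "")
                           (PySem.List.pyGetD dict_value_ls i "")))
    (PySem.Dict.empty, PySem.Dict.empty)
  st.2.items

-- ===== PORT B =====
-- literal transliteration of Source B: items list, small-input guard, dict(items[1:-1]),
-- then new_dict[first_key] = first_value.
def t_dict_surround_alt (dict_data : List (String × String)) : List (String × String) :=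
  let items := (PySem.Dict.mk dict_data : PySem.Dict String String).items
  if items.length < 2 then []
  else
    let first := PySem.List.pyGetD items 0 ("", "")
    let new_dict := PySem.Dict.ofList (PySem.List.slice items (some 1) (some (-1)))
    (new_dict.insert first.1 first.2).items

-- ===== PRECONDITION & SPEC =====
def Spec_t_dict_surround (dict_data : List (String × String)) (out : List (String × String)) : Prop := out = t_dict_surround_alt dict_data
instance (dict_data : List (String × String)) (out : List (String × String)) : Decidable (Spec_t_dict_surround dict_data out) := by unfold Spec_t_dict_surround; infer_instance

-- ===== CLAIM (what is proved, stated in full; the proofs are below) =====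
def Claim_equal_t_dict_surround : Prop := ∀ (dict_data : List (String × String)), Dom_t_dict_surround dict_data → Spec_t_dict_surround dict_data (t_dict_surround dict_data)

-- ===== LEMMAS AND PROOFS =====

-- the middle iterations (1 ≤ i < n-1) leave head_data alone and just insert item i
lemma middle_fold (n : Int) (keys values : List String)
    (H d : PySem.Dict String String) (ds : List Int)
    (hds : ∀ i ∈ ds, 1 ≤ i ∧ i < n - 1) :
    ds.foldl
      (fun (st : PySem.Dict String String × PySem.Dict String String) i =>
        if i = 0 then
          (PySem.Dict.mk [(PySem.List.pyGetD keys 0 "", PySem.List.pyGetD values 0 "")], st.2)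
        else if i = n - 1 then
          (st.1, st.2.update st.1.items)
        else
          (st.1, st.2.insert (PySem.List.pyGetD keys i "") (PySem.List.pyGetD values i "")))
      (H, d)
    = (H, ds.foldl
        (fun d i => d.insert (PySem.List.pyGetD keys i "") (PySem.List.pyGetD values i "")) d) := by
  induction ds generalizing d with
  | nil => rfl
  | cons x xs ih =>
    have hx := hds x (List.mem_cons_self ..)
    have h0 : ¬ x = 0 := by omega
    have h1 : ¬ x = n - 1 := by omega
    simp only [List.foldl_cons, if_neg h0, if_neg h1]
    exact ih _ (fun i hi => hds i (List.mem_cons_of_mem _ hi))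

lemma slice_one_neg_one (l : List (String × String)) (h : 2 ≤ l.length) :
    PySem.List.slice l (some 1) (some (-1)) = List.take (l.length - 2) (List.drop 1 l) := by
  simp only [PySem.List.slice, PySem.List.clampIdx]
  have h1 : ¬ ((1:Int) < 0) := by omega
  have h2 : ((-1:Int) < 0) := by omega
  have h3 : ¬ ((l.length:Int) + (-1) < 0) := by omega
  simp only [if_neg h1, if_pos h2, if_neg h3]
  have hmin : min (Int.toNat 1) l.length = 1 := by omega
  rw [hmin]
  congr 1
  omega

theorem t_dict_surround_eq (l : List (String × String)) :
    t_dict_surround l = t_dict_surround_alt l := by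
  match l with
  | [] => rfl
  | [x] =>
    simp [t_dict_surround, t_dict_surround_alt,
      show PySem.List.pyRange 0 1 1 = [0] from by decide, PySem.Dict.empty]
  | x :: y :: rest =>
    set l := x :: y :: rest with hl
    have hlen : 2 ≤ l.length := by simp [hl]
    unfold t_dict_surround t_dict_surround_alt
    simp only [PySem.Dict.keys_mk, PySem.Dict.values_mk, List.length_map]
    set n : Int := (l.length : Int) with hn
    have hn2 : 2 ≤ n := by simp only [hn, hl]; simp; omega
    have hrange : PySem.List.pyRange 0 n 1
        = 0 :: (PySem.List.pyRange 1 (n-1) 1 ++ [n-1]) := by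
      rw [PySem.List.pyRange_one_cons (by omega)]
      congr 1
      have h := PySem.List.pyRange_one_succ_right (a := 1) (b := n-1) (by omega)
      simpa using h
    rw [hrange]
    rw [List.foldl_cons, List.foldl_append]
    have hmem : ∀ i ∈ PySem.List.pyRange 1 (n-1) 1, 1 ≤ i ∧ i < n - 1 := by
      intro i hi
      have := PySem.List.mem_pyRange_one.mp hi
      omega
    rw [if_pos rfl, middle_fold n _ _ _ _ _ hmem]
    rw [List.foldl_cons, List.foldl_nil]
    rw [if_neg (show ¬ (n - 1 : Int) = 0 by omega), if_pos rfl,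
        if_neg (show ¬ l.length < 2 by omega)]
    have e1 : PySem.List.pyGetD l 0 ("", "") = x := by
      rw [PySem.List.pyGetD_eq_getElem l ("", "") (by omega) (by simp [hl]; try omega)]
      simp [hl]
    have e1k : PySem.List.pyGetD (List.map (fun p : String × String => p.1) l) 0 "" = x.1 := by
      rw [PySem.List.pyGetD_eq_getElem _ "" (by omega) (by simp [hl]; try omega)]
      simp [hl]
    have e1v : PySem.List.pyGetD (List.map (fun p : String × String => p.2) l) 0 "" = x.2 := by
      rw [PySem.List.pyGetD_eq_getElem _ "" (by omega) (by simp [hl]; try omega)]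
      simp [hl]
    rw [e1, e1k, e1v]
    simp only [PySem.Dict.update, List.foldl_cons, List.foldl_nil]
    set xs := l.take (l.length - 1) with hxs
    have hxslen : xs.length = l.length - 1 := by
      simp [hxs]
    have hlenxs : PySem.List.len xs = n - 1 := by
      simp [PySem.List.len, hxslen, hn]
      omega
    have hcong : ∀ (acc : PySem.Dict String String), ∀ i ∈ PySem.List.pyRange 1 (n-1) 1,
        acc.insert (PySem.List.pyGetD (List.map (fun p : String × String => p.1) l) i "")
                   (PySem.List.pyGetD (List.map (fun p : String × String => p.2) l) i "")
        = acc.insert (PySem.List.pyGetD xs i ("", "")).1 (PySem.List.pyGetD xs i ("", "")).2 := by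
      intro acc i hi
      obtain ⟨h1i, h2i⟩ := hmem i hi
      rw [PySem.List.pyGetD_eq_getElem _ "" (by omega) (by simp; omega),
          PySem.List.pyGetD_eq_getElem _ "" (by omega) (by simp; omega),
          PySem.List.pyGetD_eq_getElem xs ("", "") (by omega) (by rw [hxslen]; omega)]
      simp [hxs]
    rw [PySem.List.foldl_congr_mem _ _ _ _ hcong, ← hlenxs]
    rw [PySem.List.foldl_pyRange_pyGetD xs ("", "")
        (fun acc (p : String × String) => acc.insert p.1 p.2) PySem.Dict.empty (by omega)]
    rw [slice_one_neg_one l hlen]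
    simp only [PySem.Dict.ofList, PySem.Dict.update, hxs, Int.toNat_one, List.drop_take]
    have h22 : l.length - 1 - 1 = l.length - 2 := by omega
    rw [h22]

-- ===== VERDICT (by name: the statement is the Claim_ definition above) =====
theorem t_dict_surround_spec : Claim_equal_t_dict_surround := by
  intro l _
  unfold Spec_t_dict_surround
  exact t_dict_surround_eq l
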